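-- pv_equiv track=rewrite | github.com/djburks/SMM | Supplemental Code/nucEncoder.py | nucEncoder
-- ===== SOURCE A (Python) =====
-- def nucEncoder(nucl):
--     expo = len(nucl)
--     valu = 0
--     for n in nucl:
--         tempsum = 4**(expo - 1)
--         if n == 'A':
--             valu += (tempsum * 1)
--         elif n == 'T':
--             valu += (tempsum * 2)
--         elif n == 'C':
--             valu += (tempsum * 3)
--         elif n == 'G':
--             valu += (tempsum * 4)
--         expo = expo - 1
--     valu = str(valu)
--     return valu
-- ===== SOURCE B (Python) =====
-- def nucEncoder(nucl):
--     codes = {'A': 1, 'T': 2, 'C': 3, 'G': 4}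
--     valu = 0
--     for n in nucl:
--         valu = valu * 4 + codes.get(n, 0)
--     return str(valu)
-- ===== Notes on version B (the rewrite author's own statement) =====
-- stated objective: faster
-- what changed: Replaces the per-position place-value computation (a fresh bignum exponentiation 4**(expo-1) per character with a decrementing exponent counter and an if/elif chain) by Horner's rule with a code dictionary: valu = valu*4 + codes.get(n, 0).
import Mathlib
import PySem

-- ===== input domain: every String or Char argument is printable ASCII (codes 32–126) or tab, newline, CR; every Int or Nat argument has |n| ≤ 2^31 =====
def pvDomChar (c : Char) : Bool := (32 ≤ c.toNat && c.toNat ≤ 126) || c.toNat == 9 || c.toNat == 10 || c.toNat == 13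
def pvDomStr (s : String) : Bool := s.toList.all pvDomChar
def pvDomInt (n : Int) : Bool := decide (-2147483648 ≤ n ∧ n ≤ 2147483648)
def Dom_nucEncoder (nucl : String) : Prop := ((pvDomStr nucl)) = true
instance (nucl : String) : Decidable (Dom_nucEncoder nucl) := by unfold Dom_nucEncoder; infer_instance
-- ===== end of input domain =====

-- B replaces A's per-position place-value sum (4**(expo-1) with a decrementing exponent and if/elif chain) by Horner's rule with a code dictionary; objective: idiomatic.


-- ===== PORT A =====
-- literal port: state (expo, valu); tempsum = 4^(expo-1) (expo ≥ 1 whenever the loop body runs,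
-- so Nat subtraction agrees with Python's int subtraction here)
def nucEncoder (nucl : String) : String :=
  PySem.Int.toStr
    ((nucl.toList.foldl
    (fun (st : Nat × Int) n =>
      let expo := st.1
      let valu := st.2
      let tempsum : Int := 4 ^ (expo - 1)
      let valu :=
        if n = 'A' then valu + tempsum * 1
        else if n = 'T' then valu + tempsum * 2
        else if n = 'C' then valu + tempsum * 3
        else if n = 'G' then valu + tempsum * 4
        else valu
      (expo - 1, valu))
    (nucl.toList.length, 0)).2)

-- ===== PORT B =====
def nucCodes : PySem.Dict Char Int := PySem.Dict.ofList [('A', 1), ('T', 2), ('C', 3), ('G', 4)]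

def nucEncoder_alt (nucl : String) : String :=
  PySem.Int.toStr (nucl.toList.foldl (fun valu n => valu * 4 + nucCodes.getD n 0) 0)

-- ===== PRECONDITION & SPEC =====
def Spec_nucEncoder (nucl : String) (out : String) : Prop := out = nucEncoder_alt nucl
instance (nucl : String) (out : String) : Decidable (Spec_nucEncoder nucl out) := by unfold Spec_nucEncoder; infer_instance

-- ===== CLAIM (what is proved, stated in full; the proofs are below) =====
def Claim_equal_nucEncoder : Prop := ∀ (nucl : String), Dom_nucEncoder nucl → Spec_nucEncoder nucl (nucEncoder nucl)

-- ===== LEMMAS AND PROOFS =====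

-- the digit value of one character, as B computes it
def nucCode (n : Char) : Int := nucCodes.getD n 0

theorem nucCode_eq (n : Char) :
    nucCode n = (if n = 'A' then 1 else if n = 'T' then 2 else if n = 'C' then 3
                 else if n = 'G' then 4 else 0) := by
  have hm : nucCodes = PySem.Dict.mk [('A', 1), ('T', 2), ('C', 3), ('G', 4)] := by rfl
  split_ifs with h1 h2 h3 h4
  · subst h1; decide
  · subst h2; decide
  · subst h3; decide
  · subst h4; decide
  · rw [nucCode, hm, PySem.Dict.getD_of_not_contains]
    simp [PySem.Dict.contains_mk]
    exact ⟨fun h => h1 h.symm, fun h => h2 h.symm, fun h => h3 h.symm, fun h => h4 h.symm⟩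

-- B's Horner fold, as a function of list and accumulator
def horner (l : List Char) (a : Int) : Int :=
  l.foldl (fun valu n => valu * 4 + nucCode n) a

theorem horner_shift (l : List Char) (a : Int) :
    horner l a = a * 4 ^ l.length + horner l 0 := by
  induction l generalizing a with
  | nil => simp [horner]
  | cons n t ih =>
    have h1 : horner (n :: t) a = horner t (a * 4 + nucCode n) := rfl
    have h2 : horner (n :: t) 0 = horner t (0 * 4 + nucCode n) := rfl
    rw [h1, h2, ih (a * 4 + nucCode n), ih (0 * 4 + nucCode n)]
    simp only [List.length_cons]
    ring

-- A's loop step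
def stepA (st : Nat × Int) (n : Char) : Nat × Int :=
  let expo := st.1
  let valu := st.2
  let tempsum : Int := 4 ^ (expo - 1)
  let valu :=
    if n = 'A' then valu + tempsum * 1
    else if n = 'T' then valu + tempsum * 2
    else if n = 'C' then valu + tempsum * 3
    else if n = 'G' then valu + tempsum * 4
    else valu
  (expo - 1, valu)

theorem stepA_val (e : Nat) (v : Int) (n : Char) :
    stepA (e, v) n = (e - 1, v + 4 ^ (e - 1) * nucCode n) := by
  rw [nucCode_eq]
  simp only [stepA]
  split_ifs <;> ring_nf

-- invariant: A's fold started at (l.length, v) produces v + horner l 0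
theorem foldA_eq (l : List Char) (v : Int) :
    (l.foldl stepA (l.length, v)).2 = v + horner l 0 := by
  induction l generalizing v with
  | nil => simp [horner]
  | cons n t ih =>
    simp only [List.foldl_cons, List.length_cons]
    rw [stepA_val (t.length + 1) v n]
    simp only [Nat.add_sub_cancel]
    rw [ih (v + 4 ^ t.length * nucCode n)]
    have h2 : horner (n :: t) 0 = horner t (0 * 4 + nucCode n) := rfl
    rw [h2, horner_shift t (0 * 4 + nucCode n)]
    ring

-- ===== VERDICT (by name: the statement is the Claim_ definition above) =====
theorem nucEncoder_spec : Claim_equal_nucEncoder := by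
  intro nucl _
  show nucEncoder nucl = nucEncoder_alt nucl
  rw [show nucEncoder nucl = PySem.Int.toStr ((nucl.toList.foldl stepA (nucl.toList.length, 0)).2) from rfl]
  have hB : nucl.toList.foldl (fun valu n => valu * 4 + nucCodes.getD n 0) 0
      = horner nucl.toList 0 := rfl
  rw [foldA_eq nucl.toList 0]
  unfold nucEncoder_alt
  rw [hB]
  simp
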